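-- pv_equiv track=rewrite | github.com/SE-UP/daws_repository_mining | workflow/scripts/git_analyzer.py | _get_snakemake_module_names_from_code
-- ===== SOURCE A (Python) =====
-- def _get_snakemake_module_names_from_code(code=""):
--     """
--     Return the list of Snakemake modules from the code.
--     """
--     modules = list()
--     for line in code.splitlines():
--         # remove whitespaces and commit_parents
--         line = line.strip()
--         if line.startswith("module "):
--             module_name = (line.split()[1]).split(":")[0]
--             modules.append(module_name)
--
--     return modules
-- ===== SOURCE B (Python) =====
-- import re
--
-- # One pass over the whole text with a compiled regex instead of a split/strip/split
-- # pipeline: anchor at the start of the text or right after a line break (both \r and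
-- # \n end lines), allow leading blanks, require the "module " keyword, skip further
-- # blanks and capture the module name up to the next blank, line break or ':'.
-- _MODULE_RE = re.compile(r'(?:\A|[\r\n])[ \t]*module [ \t]*([^ \t\r\n:]+)')
--
--
-- def _get_snakemake_module_names_from_code(code=""):
--     """
--     Return the list of Snakemake modules from the code.
--     """
--     return _MODULE_RE.findall(code)
-- ===== Notes on version B (the rewrite author's own statement) =====
-- stated objective: idiomatic
-- what changed: Replaced the per-line strip/startswith/split pipeline with a single compiled regex, anchored at the start of the text or right after a line break, applied once to the whole text with re.findall to collect the captured non-empty names.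
-- intended difference: On lines where the first non-blank character after the module keyword is a colon (e.g. the line module :x), A appends the empty string as a module name while B skips the line; an empty module name is not a module name, so B's value is the intended one. — e.g. on _get_snakemake_module_names_from_code("module :x"): A returns [""], B returns []
import Mathlib
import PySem

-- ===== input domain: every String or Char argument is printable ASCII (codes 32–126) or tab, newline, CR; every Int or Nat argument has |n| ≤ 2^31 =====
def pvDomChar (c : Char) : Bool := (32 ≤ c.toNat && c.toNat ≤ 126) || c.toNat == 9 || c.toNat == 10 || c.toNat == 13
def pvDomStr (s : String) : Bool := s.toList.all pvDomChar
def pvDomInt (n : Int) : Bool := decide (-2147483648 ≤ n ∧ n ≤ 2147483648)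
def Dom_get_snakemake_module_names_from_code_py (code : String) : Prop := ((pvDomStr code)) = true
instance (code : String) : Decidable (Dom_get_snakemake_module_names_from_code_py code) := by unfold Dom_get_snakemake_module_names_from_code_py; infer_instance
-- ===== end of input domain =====

-- B replaces A's per-line strip/split/split pipeline by a single anchored scan over the whole
-- text (Python: one compiled regex + findall) that captures a NON-EMPTY name; on lines like
-- "module :x" A returns '' as a name while B skips the line (stated as D_ below).

-- ===== PORT A =====
-- Loop body of A's `for line in code.splitlines()`.  The `none` fallbacks mirror Python's
-- IndexError, but they are unreachable: a stripped line that starts with "module " always has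
-- a second whitespace-token, and str.split(":") never returns an empty list.
def pvBodyA (modules : List String) (line : String) : List String :=
  let l := PySem.Str.strip line
  if PySem.Str.startswith l "module " then
    match PySem.List.pyGet? (PySem.Str.split₀ l) 1 with
    | some tok =>
      match PySem.Str.split? tok ":" with
      | some pieces =>
        match PySem.List.pyGet? pieces 0 with
        | some name => modules ++ [name]
        | none => modules
      | none => modules
    | none => modules
  else modules

def get_snakemake_module_names_from_code_py (code : String) : List String :=
  (PySem.Str.splitlines code).foldl pvBodyA []

-- ===== PORT B =====
-- Hand port of Source B's compiled regex r'(?:\A|[\r\n])[ \t]*module [ \t]*([^ \t\r\n:]+)'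
-- scanned with findall: one match attempt at each anchor (start of string / right after each
-- line-break character).  No consumed character class contains \r or \n, so an attempt only
-- ever inspects the current line; `pvMatchAt` is the attempt, `pvScan` the anchor loop.
def pvIsSp (c : Char) : Bool := c == ' ' || c == '\t'
def pvIsBrk (c : Char) : Bool := c == '\n' || c == '\r'
def pvCap (c : Char) : Bool := !(pvIsSp c || pvIsBrk c || c == ':')

def pvMatchAt (line : List Char) : Option (List Char) :=
  let r := line.dropWhile pvIsSp                     -- [ \t]*
  if "module ".toList.isPrefixOf r then              -- literal "module "
    let name := ((r.drop 7).dropWhile pvIsSp).takeWhile pvCap  -- [ \t]* then ([^ \t\r\n:]+)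
    if name.isEmpty then none else some name         -- + : the capture must be non-empty
  else none

theorem pvScan_dec (c : Char) (cs : List Char) :
    (((c :: cs).dropWhile fun x => !pvIsBrk x).drop 1).length < (c :: cs).length := by
  have h := (List.dropWhile_sublist (l := c :: cs) (p := fun x => !pvIsBrk x)).length_le
  simp only [List.length_drop]
  simp at h ⊢
  omega

def pvScan : List Char → List String
  | [] => []
  | c :: cs =>
    (match pvMatchAt ((c :: cs).takeWhile fun x => !pvIsBrk x) with
     | some name => [String.ofList name]
     | none => []) ++
    pvScan (((c :: cs).dropWhile fun x => !pvIsBrk x).drop 1)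
termination_by l => l.length
decreasing_by exact pvScan_dec c cs

def get_snakemake_module_names_from_code_py_alt (code : String) : List String :=
  pvScan code.toList

-- ===== PRECONDITION & SPEC =====
-- On lines where the first non-blank character after the module keyword is a colon,
-- A extracts the empty string as a module name while B skips the line; an empty module
-- name is not a module name, so B's value is the intended one.
def D_get_snakemake_module_names_from_code_py (code : String) : Prop :=
  ∃ l ∈ PySem.Str.splitlines code,
    let t := PySem.Chars.lstrip l.toList
    t.take 7 = "module ".toList ∧ (PySem.Chars.lstrip (t.drop 7)).take 1 = [':']
instance (code : String) : Decidable (D_get_snakemake_module_names_from_code_py code) := by unfold D_get_snakemake_module_names_from_code_py; infer_instance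

def Spec_get_snakemake_module_names_from_code_py (code : String) (out : List String) : Prop := ¬ D_get_snakemake_module_names_from_code_py code → out = get_snakemake_module_names_from_code_py_alt code
instance (code : String) (out : List String) : Decidable (Spec_get_snakemake_module_names_from_code_py code out) := by unfold Spec_get_snakemake_module_names_from_code_py; infer_instance

def pvDiffWitness_get_snakemake_module_names_from_code_py : String := "module :x"
def pvDiffWitnessOut_get_snakemake_module_names_from_code_py : (List String) × (List String) := ([""], [])

-- ===== CLAIM (what is proved, stated in full; the proofs are below) =====
def Claim_unchanged_get_snakemake_module_names_from_code_py : Prop := ∀ (code : String), Dom_get_snakemake_module_names_from_code_py code → Spec_get_snakemake_module_names_from_code_py code (get_snakemake_module_names_from_code_py code)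
def Claim_changed_get_snakemake_module_names_from_code_py : Prop := Dom_get_snakemake_module_names_from_code_py (pvDiffWitness_get_snakemake_module_names_from_code_py) ∧ D_get_snakemake_module_names_from_code_py (pvDiffWitness_get_snakemake_module_names_from_code_py) ∧ get_snakemake_module_names_from_code_py (pvDiffWitness_get_snakemake_module_names_from_code_py) = pvDiffWitnessOut_get_snakemake_module_names_from_code_py.1 ∧ get_snakemake_module_names_from_code_py_alt (pvDiffWitness_get_snakemake_module_names_from_code_py) = pvDiffWitnessOut_get_snakemake_module_names_from_code_py.2 ∧ pvDiffWitnessOut_get_snakemake_module_names_from_code_py.1 ≠ pvDiffWitnessOut_get_snakemake_module_names_from_code_py.2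
def Claim_exact_get_snakemake_module_names_from_code_py : Prop := ∀ (code : String), Dom_get_snakemake_module_names_from_code_py code → D_get_snakemake_module_names_from_code_py code → get_snakemake_module_names_from_code_py code ≠ get_snakemake_module_names_from_code_py_alt code

-- ===== LEMMAS AND PROOFS =====

-- The per-line condition of D_, named for the proofs.
def pvBadB (l : List Char) : Bool :=
  ((PySem.Chars.lstrip l).take 7 == "module ".toList) &&
  ((PySem.Chars.lstrip ((PySem.Chars.lstrip l).drop 7)).take 1 == [':'])

theorem pvBadB_iff (l : List Char) :
    pvBadB l = true ↔ ((PySem.Chars.lstrip l).take 7 = "module ".toList ∧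
      (PySem.Chars.lstrip ((PySem.Chars.lstrip l).drop 7)).take 1 = [':']) := by
  simp [pvBadB]

theorem pv_D_iff (code : String) :
    D_get_snakemake_module_names_from_code_py code ↔
      ∃ l ∈ PySem.Str.splitlines code, pvBadB l.toList = true := by
  unfold D_get_snakemake_module_names_from_code_py
  constructor
  · rintro ⟨l, hl, h1, h2⟩
    exact ⟨l, hl, (pvBadB_iff _).mpr ⟨h1, h2⟩⟩
  · rintro ⟨l, hl, h⟩
    obtain ⟨h1, h2⟩ := (pvBadB_iff _).mp h
    exact ⟨l, hl, h1, h2⟩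


-- Facts about characters, reduced to arithmetic on code points.
theorem pv_char_eq_iff (c d : Char) : (c = d) ↔ c.toNat = d.toNat :=
  ⟨fun h => by rw [h], fun h => Char.ext (by exact UInt32.toNat_inj.mp h)⟩

theorem pv_char_beq (c d : Char) : (c == d) = decide (c.toNat = d.toNat) := by
  by_cases h : c = d
  · subst h; simp
  · have h2 : ¬ c.toNat = d.toNat := fun hn => h ((pv_char_eq_iff c d).mpr hn)
    simp [h, h2]

-- Abbreviation used throughout the proofs.
def pvWs : Char → Bool := PySem.Chars.isspace

-- On domain characters that are not line breaks, Python `isspace` coincides with [ \t].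
theorem pv_ws_eq (c : Char) (hd : pvDomChar c = true) (hb : pvIsBrk c = false) :
    pvWs c = pvIsSp c := by
  simp [pvDomChar] at hd
  simp [pvIsBrk, pv_char_eq_iff] at hb
  simp only [pvWs, PySem.Chars.isspace, pvIsSp, pv_char_beq]
  rw [Bool.eq_iff_iff]
  simp only [Bool.or_eq_true, Bool.and_eq_true, decide_eq_true_eq]
  show _ ↔ (c.toNat = 32 ∨ c.toNat = 9)
  omega

-- splitlines' break test, named, and its value on domain characters.
def pvIsB0 (c : Char) : Bool :=
  have n := c.toNat
  decide (n = 10) || decide (n = 13) || decide (n = 11) || decide (n = 12) || decide (n = 28) ||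
    decide (n = 29) || decide (n = 30) || decide (n = 133) || decide (n = 8232) || decide (n = 8233)

theorem pv_splitlines_eq (cs : List Char) :
    PySem.Chars.splitlines cs = PySem.Chars.splitlines.go pvIsB0 cs [] [] := rfl

theorem pvIsB0_eq (c : Char) (hd : pvDomChar c = true) : pvIsB0 c = pvIsBrk c := by
  simp [pvDomChar] at hd
  simp only [pvIsB0, pvIsBrk, pv_char_beq]
  rw [Bool.eq_iff_iff]
  simp only [Bool.or_eq_true, decide_eq_true_eq]
  show _ ↔ (c.toNat = 10 ∨ c.toNat = 13)
  omega

-- Structural mirror of splitlines.go without the accumulator.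
def pvLinesAux (isB : Char → Bool) : List Char → List Char → List (List Char)
  | [], cur => if cur.isEmpty then [] else [cur.reverse]
  | '\x0d' :: '\n' :: rest, cur => cur.reverse :: pvLinesAux isB rest []
  | c :: rest, cur => if isB c then cur.reverse :: pvLinesAux isB rest [] else pvLinesAux isB rest (c :: cur)

theorem pv_go_eq (isB : Char → Bool) (cs : List Char) (cur : List Char) :
    ∀ acc, PySem.Chars.splitlines.go isB cs cur acc = acc.reverse ++ pvLinesAux isB cs cur := by
  induction cs, cur using pvLinesAux.induct isB <;> intro acc <;>
    simp_all [PySem.Chars.splitlines.go, pvLinesAux]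

theorem pvLinesAux_cons (isB : Char → Bool) (a : Char) (ha : a ≠ '\x0d') (rest cur : List Char) :
    pvLinesAux isB (a :: rest) cur =
      if isB a then cur.reverse :: pvLinesAux isB rest [] else pvLinesAux isB rest (a :: cur) := by
  rw [pvLinesAux.eq_def]
  split
  · simp_all
  · simp_all [List.cons.injEq]
  · rename_i heq
    rw [List.cons.injEq] at heq
    obtain ⟨rfl, rfl⟩ := heq
    rfl

theorem pvLinesAux_brk (isB : Char → Bool) (b : Char) (r cur : List Char)
    (hb : isB b = true) (hnot : ¬(b = '\x0d' ∧ ∃ r2, r = '\n' :: r2)) :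
    pvLinesAux isB (b :: r) cur = cur.reverse :: pvLinesAux isB r [] := by
  rw [pvLinesAux.eq_def]
  split
  · simp_all
  · rename_i heq
    rw [List.cons.injEq] at heq
    exact absurd ⟨heq.1, _, heq.2⟩ hnot
  · rename_i heq
    rw [List.cons.injEq] at heq
    obtain ⟨rfl, rfl⟩ := heq
    rw [if_pos hb]

-- Characters of every produced line come from the accumulator or are non-break input chars.
theorem pvLinesAux_chars_aux (isB : Char → Bool) (hR : isB '\x0d' = true) (n : Nat) :
    ∀ (cs cur : List Char), cs.length ≤ n →
    ∀ l ∈ pvLinesAux isB cs cur, ∀ c ∈ l, c ∈ cur ∨ (c ∈ cs ∧ isB c = false) := by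
  induction n with
  | zero =>
    intro cs cur hl l hmem c hc
    have h0 : cs = [] := List.eq_nil_of_length_eq_zero (by omega)
    subst h0
    rw [pvLinesAux] at hmem
    split at hmem
    · cases hmem
    · rcases List.mem_singleton.mp hmem with rfl
      exact Or.inl (by simpa using hc)
  | succ n ih =>
    intro cs cur hl l hmem c hc
    cases cs with
    | nil =>
      rw [pvLinesAux] at hmem
      split at hmem
      · cases hmem
      · rcases List.mem_singleton.mp hmem with rfl
        exact Or.inl (by simpa using hc)
    | cons a rest =>
      by_cases hcrlf : a = '\x0d' ∧ ∃ r2, rest = '\n' :: r2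
      · obtain ⟨rfl, r2, rfl⟩ := hcrlf
        rw [show pvLinesAux isB ('\x0d' :: '\n' :: r2) cur =
          cur.reverse :: pvLinesAux isB r2 [] from rfl] at hmem
        rcases List.mem_cons.mp hmem with rfl | hmem
        · exact Or.inl (by simpa using hc)
        · rcases ih r2 [] (by simp at hl ⊢; omega) l hmem c hc with h | ⟨h1, h2⟩
          · cases h
          · exact Or.inr ⟨by simp [h1], h2⟩
      · by_cases hb : isB a = true
        · rw [pvLinesAux_brk isB a rest cur hb hcrlf] at hmem
          rcases List.mem_cons.mp hmem with rfl | hmem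
          · exact Or.inl (by simpa using hc)
          · rcases ih rest [] (by simp at hl ⊢; omega) l hmem c hc with h | ⟨h1, h2⟩
            · cases h
            · exact Or.inr ⟨by simp [h1], h2⟩
        · have hane : a ≠ '\x0d' := fun hcon => hb (hcon ▸ hR)
          rw [pvLinesAux_cons isB a hane rest cur, if_neg hb] at hmem
          rcases ih rest (a :: cur) (by simp at hl ⊢; omega) l hmem c hc with h | ⟨h1, h2⟩
          · rcases List.mem_cons.mp h with rfl | h
            · exact Or.inr ⟨by simp, by simpa using hb⟩
            · exact Or.inl h
          · exact Or.inr ⟨by simp [h1], h2⟩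

theorem pvLinesAux_chars (isB : Char → Bool) (hR : isB '\x0d' = true) (cs cur : List Char) :
    ∀ l ∈ pvLinesAux isB cs cur, ∀ c ∈ l, c ∈ cur ∨ (c ∈ cs ∧ isB c = false) :=
  pvLinesAux_chars_aux isB hR cs.length cs cur le_rfl

-- line ++ d with a break-free line: the mirror walks through the whole line.
theorem pv_linesAux_append (isB : Char → Bool) (hR : isB '\x0d' = true)
    (line : List Char) : ∀ d cur, (∀ c ∈ line, isB c = false) →
    pvLinesAux isB (line ++ d) cur = pvLinesAux isB d (line.reverse ++ cur) := by
  induction line with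
  | nil => intro d cur _; simp
  | cons a line' ih =>
    intro d cur h
    have ha : isB a = false := h a (by simp)
    have hane : a ≠ '\x0d' := fun hcon => by rw [hcon, hR] at ha; cases ha
    rw [List.cons_append, pvLinesAux_cons isB a hane, if_neg (by simp [ha]),
      ih d (a :: cur) (fun c hc => h c (by simp [hc]))]
    simp

-- The loop body appends; the fold is a flatMap.
theorem pvBodyA_append (m : List String) (line : String) :
    pvBodyA m line = m ++ pvBodyA [] line := by
  unfold pvBodyA
  dsimp only
  split
  · split
    · split
      · split <;> simp
      · simp
    · simp
  · simp

theorem pv_foldl_bodyA (lines : List String) : ∀ acc : List String,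
    lines.foldl pvBodyA acc = acc ++ lines.flatMap (pvBodyA []) := by
  induction lines with
  | nil => intro acc; simp
  | cons l ls ih =>
    intro acc
    rw [List.foldl_cons, ih, pvBodyA_append, List.flatMap_cons, List.append_assoc]

-- ==== word-splitting (split₀) characterised ====
def pvWords (cs : List Char) : List (List Char) :=
  match h : cs.dropWhile pvWs with
  | [] => []
  | c :: r => (c :: r.takeWhile (fun x => !pvWs x)) :: pvWords (r.dropWhile (fun x => !pvWs x))
termination_by cs.length
decreasing_by
  have h1 := (List.dropWhile_sublist (l := cs) (p := pvWs)).length_le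
  have h2 := (List.dropWhile_sublist (l := r) (p := fun x => !pvWs x)).length_le
  rw [h] at h1; simp at h1 ⊢; omega

theorem pvWords_nil : pvWords [] = [] := by rw [pvWords.eq_def]; rfl

theorem pvWords_ws (c : Char) (rest : List Char) (h : pvWs c = true) :
    pvWords (c :: rest) = pvWords rest := by
  rw [pvWords.eq_def, pvWords.eq_def]
  have : (c :: rest).dropWhile pvWs = rest.dropWhile pvWs := by
    rw [List.dropWhile_cons, if_pos h]
  rw [this]

theorem pvWords_word (c : Char) (rest : List Char) (h : pvWs c = false) :
    pvWords (c :: rest) =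
      (c :: rest.takeWhile (fun x => !pvWs x)) :: pvWords (rest.dropWhile (fun x => !pvWs x)) := by
  rw [pvWords.eq_def]
  have : (c :: rest).dropWhile pvWs = c :: rest := by
    rw [List.dropWhile_cons, if_neg (by simp [h])]
  rw [this]

theorem pv_split₀_go_eq (cs : List Char) : ∀ (cur : List Char) (acc : List (List Char)),
    PySem.Chars.split₀.go cs cur acc =
      acc.reverse ++ (if cur.isEmpty then pvWords cs
        else (cur.reverse ++ cs.takeWhile (fun x => !pvWs x)) ::
          pvWords (cs.dropWhile (fun x => !pvWs x))) := by
  induction cs with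
  | nil =>
    intro cur acc
    simp only [PySem.Chars.split₀.go]
    cases cur <;> simp [pvWords_nil]
  | cons c rest ih =>
    intro cur acc
    by_cases hws : pvWs c = true
    · rw [show PySem.Chars.split₀.go (c :: rest) cur acc =
          (if cur.isEmpty then PySem.Chars.split₀.go rest [] acc
           else PySem.Chars.split₀.go rest [] (cur.reverse :: acc)) from by
        simp only [PySem.Chars.split₀.go]; rw [if_pos (by simpa [pvWs] using hws)]]
      cases cur with
      | nil => simp [ih, pvWords_ws c rest hws]
      | cons x xs =>
        simp only [List.isEmpty_cons, if_neg]
        rw [ih [] ((x :: xs).reverse :: acc)]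
        simp [pvWords_ws c rest hws, List.takeWhile_cons, List.dropWhile_cons, hws]
    · have hws' : pvWs c = false := by simpa using hws
      rw [show PySem.Chars.split₀.go (c :: rest) cur acc =
          PySem.Chars.split₀.go rest (c :: cur) acc from by
        simp only [PySem.Chars.split₀.go]; rw [if_neg (by simpa [pvWs] using hws)]]
      rw [ih (c :: cur) acc]
      cases cur <;>
        simp [pvWords_word c rest hws', List.takeWhile_cons, List.dropWhile_cons, hws']

theorem pv_split₀_eq (cs : List Char) : PySem.Chars.split₀ cs = pvWords cs := by
  rw [PySem.Chars.split₀, pv_split₀_go_eq]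
  simp

-- pvWords eats a leading non-ws word followed by a space.
theorem pv_pvWords_word_sp (w x : List Char) (hw : ∀ c ∈ w, pvWs c = false) (h0 : w ≠ []) :
    pvWords (w ++ (' ' :: x)) = w :: pvWords x := by
  cases w with
  | nil => exact absurd rfl h0
  | cons a w' =>
    rw [List.cons_append, pvWords_word a _ (hw a (by simp))]
    have hsp : pvWs ' ' = true := by decide
    have htk : (w' ++ ' ' :: x).takeWhile (fun y => !pvWs y) = w' := by
      rw [List.takeWhile_append]
      rw [if_pos (by rw [List.takeWhile_eq_self_iff.mpr (fun c hc => by simp [hw c (by simp [hc])])])]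
      simp [List.takeWhile_cons, hsp]
    have hdr : (w' ++ ' ' :: x).dropWhile (fun y => !pvWs y) = ' ' :: x := by
      rw [List.dropWhile_append]
      rw [List.dropWhile_eq_nil_iff.mpr (fun c hc => by simp [hw c (by simp [hc])])]
      simp [List.dropWhile_cons, hsp]
    rw [htk, hdr, pvWords_ws ' ' x hsp]

-- ==== splitOn [':'] : the first piece is everything before the first ':' ====
theorem pv_splitOn_go_acc (sep : List Char) (fuel : Nat) :
    ∀ (l cur : List Char) (acc : List (List Char)),
    ∃ tail, PySem.Chars.splitOn.go sep fuel l cur acc = acc.reverse ++ tail := by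
  induction fuel with
  | zero => intro l cur acc; exact ⟨[cur.reverse ++ l], by simp [PySem.Chars.splitOn.go]⟩
  | succ f ih =>
    intro l cur acc
    cases l with
    | nil => exact ⟨[cur.reverse], by simp [PySem.Chars.splitOn.go]⟩
    | cons c r =>
      by_cases hp : sep.isPrefixOf (c :: r) = true
      · obtain ⟨tail, ht⟩ := ih (List.drop sep.length (c :: r)) [] (cur.reverse :: acc)
        refine ⟨cur.reverse :: tail, ?_⟩
        simp only [PySem.Chars.splitOn.go]
        rw [if_pos hp, ht]
        simp
      · obtain ⟨tail, ht⟩ := ih r (c :: cur) acc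
        refine ⟨tail, ?_⟩
        simp only [PySem.Chars.splitOn.go]
        rw [if_neg hp, ht]

theorem pv_splitOn_go_colon (l : List Char) : ∀ (fuel : Nat) (cur : List Char)
    (acc : List (List Char)), l.length < fuel →
    ∃ tail, PySem.Chars.splitOn.go [':'] fuel l cur acc =
      acc.reverse ++ (cur.reverse ++ l.takeWhile (fun c => !(c == ':'))) :: tail := by
  induction l with
  | nil =>
    intro fuel cur acc h
    cases fuel with
    | zero => omega
    | succ f => exact ⟨[], by simp [PySem.Chars.splitOn.go]⟩
  | cons c r ih =>
    intro fuel cur acc h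
    cases fuel with
    | zero => omega
    | succ f =>
      by_cases hc : c = ':'
      · subst hc
        have hp : List.isPrefixOf [':'] (':' :: r) = true := by simp [List.isPrefixOf]
        obtain ⟨tail, ht⟩ := pv_splitOn_go_acc [':'] f r [] (cur.reverse :: acc)
        refine ⟨tail, ?_⟩
        simp only [PySem.Chars.splitOn.go]
        rw [if_pos hp]
        simpa [List.takeWhile_cons] using ht
      · have hbeq : (':' == c) = false := by
          simp only [beq_eq_false_iff_ne, ne_eq]
          exact fun hcon => hc hcon.symm
        have hp : List.isPrefixOf [':'] (c :: r) = false := by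
          simp [List.isPrefixOf, hbeq]
        obtain ⟨tail, ht⟩ := ih f (c :: cur) acc (by simp at h ⊢; omega)
        refine ⟨tail, ?_⟩
        simp only [PySem.Chars.splitOn.go]
        rw [if_neg (by simp [hp]), ht]
        have hbeq2 : (c == ':') = false := by simp [hc]
        simp [List.takeWhile_cons, hbeq2]

theorem pv_splitOn_colon (l : List Char) :
    ∃ tail, PySem.Chars.splitOn l [':'] = (l.takeWhile (fun c => !(c == ':'))) :: tail := by
  obtain ⟨tail, ht⟩ := pv_splitOn_go_colon l (l.length + 1) [] [] (by omega)
  exact ⟨tail, by rw [PySem.Chars.splitOn]; simpa using ht⟩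

-- ==== rstrip lemmas ====
theorem pv_rstrip_cons (a : Char) (t : List Char) (h : pvWs a = false) :
    PySem.Chars.rstrip (a :: t) = a :: PySem.Chars.rstrip t := by
  unfold PySem.Chars.rstrip
  rw [List.reverse_cons, List.dropWhile_append]
  split
  · rename_i hemp
    simp only [List.isEmpty_iff] at hemp
    rw [hemp, List.dropWhile_cons]
    simp [pvWs] at h
    simp [h]
  · simp

theorem pv_rstrip_prefix (l : List Char) : PySem.Chars.rstrip l <+: l := by
  unfold PySem.Chars.rstrip
  have h := List.dropWhile_suffix (l := l.reverse) (p := PySem.Chars.isspace)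
  have := h.reverse
  simpa using this

theorem pv_rstrip_all (b : List Char) (hb : ∀ x ∈ b, pvWs x = true) :
    PySem.Chars.rstrip b = [] := by
  unfold PySem.Chars.rstrip
  have h : List.dropWhile PySem.Chars.isspace b.reverse = [] :=
    List.dropWhile_eq_nil_iff.mpr (fun x hx => hb x (by simpa using hx))
  rw [h]
  rfl

theorem pv_rstrip_append_all (a b : List Char) (hb : ∀ x ∈ b, pvWs x = true) :
    PySem.Chars.rstrip (a ++ b) = PySem.Chars.rstrip a := by
  unfold PySem.Chars.rstrip
  rw [List.reverse_append, List.dropWhile_append,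
    if_pos (by simp [List.dropWhile_eq_nil_iff]; intro x hx; exact hb x (by simpa using hx))]

theorem pv_rstrip_append (a b : List Char) (hb : ∃ x ∈ b, pvWs x = false) :
    PySem.Chars.rstrip (a ++ b) = a ++ PySem.Chars.rstrip b := by
  unfold PySem.Chars.rstrip
  rw [List.reverse_append, List.dropWhile_append]
  rw [if_neg ?hne]
  · simp
  · obtain ⟨x, hx, hxf⟩ := hb
    simp [List.isEmpty_iff, List.dropWhile_eq_nil_iff]
    exact ⟨x, by simpa using hx, by simpa [pvWs] using hxf⟩

theorem pv_takeWhile_rstrip (l : List Char) :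
    (PySem.Chars.rstrip l).takeWhile (fun x => !pvWs x) = l.takeWhile (fun x => !pvWs x) := by
  induction l with
  | nil => simp [PySem.Chars.rstrip]
  | cons a t ih =>
    by_cases h : pvWs a = true
    · by_cases hall : ∀ x ∈ t, pvWs x = true
      · rw [pv_rstrip_all (a :: t) (by intro x hx; rcases List.mem_cons.mp hx with rfl | hx
                                       exacts [h, hall x hx])]
        simp [List.takeWhile_cons, h]
      · push Not at hall
        have : ∃ x ∈ t, pvWs x = false := by
          obtain ⟨x, hx, hxf⟩ := hall
          exact ⟨x, hx, by simpa using hxf⟩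
        rw [show (a :: t) = [a] ++ t from rfl, pv_rstrip_append [a] t this]
        simp [List.takeWhile_cons, h]
    · have h' : pvWs a = false := by simpa using h
      rw [pv_rstrip_cons a t h']
      simp [List.takeWhile_cons, h', ih]

-- ==== congruence / composition helpers for takeWhile and dropWhile ====
theorem pv_takeWhile_congr {α : Type} (p q : α → Bool) :
    ∀ l : List α, (∀ x ∈ l, p x = q x) → l.takeWhile p = l.takeWhile q := by
  intro l
  induction l with
  | nil => intro _; rfl
  | cons a t ih =>
    intro h
    rw [List.takeWhile_cons, List.takeWhile_cons, h a (by simp),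
      ih (fun x hx => h x (by simp [hx]))]

theorem pv_dropWhile_congr {α : Type} (p q : α → Bool) :
    ∀ l : List α, (∀ x ∈ l, p x = q x) → l.dropWhile p = l.dropWhile q := by
  intro l
  induction l with
  | nil => intro _; rfl
  | cons a t ih =>
    intro h
    rw [List.dropWhile_cons, List.dropWhile_cons, h a (by simp),
      ih (fun x hx => h x (by simp [hx]))]

theorem pv_takeWhile_and {α : Type} (p q : α → Bool) :
    ∀ l : List α, l.takeWhile (fun x => p x && q x) = (l.takeWhile p).takeWhile q := by
  intro l
  induction l with
  | nil => rfl
  | cons a t ih =>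
    by_cases hp : p a = true
    · by_cases hq : q a = true
      · simp [List.takeWhile_cons, hp, hq, ih]
      · simp [List.takeWhile_cons, hp, Bool.eq_false_iff.mpr hq]
    · simp [List.takeWhile_cons, Bool.eq_false_iff.mpr hp]

-- pvWords ignores leading whitespace.
theorem pvWords_ws_append (pre : List Char) : ∀ y, (∀ x ∈ pre, pvWs x = true) →
    pvWords (pre ++ y) = pvWords y := by
  induction pre with
  | nil => intro y _; rfl
  | cons a t ih =>
    intro y h
    rw [List.cons_append, pvWords_ws a _ (h a (by simp)), ih y (fun x hx => h x (by simp [hx]))]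

theorem pv_dropWhile_head_false {α : Type} (p : α → Bool) (c : α) (r : List α) :
    ∀ l : List α, List.dropWhile p l = c :: r → p c = false := by
  intro l
  induction l with
  | nil => intro h; cases h
  | cons x xs ih =>
    intro h
    rw [List.dropWhile_cons] at h
    split at h
    · exact ih h
    · rename_i hx
      obtain ⟨rfl, rfl⟩ := List.cons.injEq .. |>.mp h
      simpa using hx

-- Per-line result of B's matcher, as a list contribution.
def pvLineRes (l : List Char) : List String :=
  match pvMatchAt l with
  | some name => [String.ofList name]
  | none => []

theorem pv_flatMap_congr {α β : Type} (f g : α → List β) :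
    ∀ l : List α, (∀ x ∈ l, f x = g x) → l.flatMap f = l.flatMap g := by
  intro l
  induction l with
  | nil => intro _; rfl
  | cons a t ih =>
    intro h
    rw [List.flatMap_cons, List.flatMap_cons, h a (by simp), ih (fun x hx => h x (by simp [hx]))]

-- ==== the per-line contribution lemma ====
-- A's loop body on a break-free domain line: [""]' on a bad line, B's match result otherwise.
set_option maxRecDepth 8192 in
theorem pv_line_main (line : List Char) (hd : ∀ c ∈ line, pvDomChar c = true)
    (hb : ∀ c ∈ line, pvIsBrk c = false) :
    pvBodyA [] (String.ofList line) =
      (if pvBadB line then [""] else pvLineRes line) := by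
  have hws : ∀ c ∈ line, pvWs c = pvIsSp c := fun c hc => pv_ws_eq c (hd c hc) (hb c hc)
  have hws' : ∀ c ∈ line, PySem.Chars.isspace c = pvIsSp c := hws
  -- both sides look at r = line with leading blanks removed
  have hrw : line.dropWhile PySem.Chars.isspace = line.dropWhile pvIsSp :=
    pv_dropWhile_congr _ _ line hws'
  set r := line.dropWhile pvIsSp with hr
  have hrsub : ∀ c ∈ r, c ∈ line := fun c hc => (List.dropWhile_sublist _).subset hc
  have hstrip : PySem.Chars.strip line = PySem.Chars.rstrip r := by
    rw [PySem.Chars.strip, PySem.Chars.lstrip, hrw]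
  have hbody : pvBodyA [] (String.ofList line) =
      (let l := String.ofList (PySem.Chars.rstrip r)
       if PySem.Str.startswith l "module " = true then
         match PySem.List.pyGet? (PySem.Str.split₀ l) 1 with
         | some tok =>
           match PySem.Str.split? tok ":" with
           | some pieces =>
             match PySem.List.pyGet? pieces 0 with
             | some name => [] ++ [name]
             | none => []
           | none => []
         | none => []
       else []) := by
    rw [pvBodyA]
    rw [show PySem.Str.strip (String.ofList line) = String.ofList (PySem.Chars.rstrip r) from by
      rw [PySem.Str.strip, String.toList_ofList, hstrip]]
  have hls : PySem.Chars.lstrip line = r := by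
    rw [PySem.Chars.lstrip]; exact hrw
  rw [hbody, pvLineRes, pvMatchAt]
  simp only [← hr]
  by_cases hp : "module ".toList.isPrefixOf r = true
  · -- the anchor matches "module "
    obtain ⟨rest, hrest⟩ := List.isPrefixOf_iff_prefix.mp hp
    have hdrop : List.drop 7 r = rest := by
      rw [← hrest, show ("module ".toList : List Char) = ['m','o','d','u','l','e',' '] from rfl]
      exact List.drop_left (l₁ := ['m','o','d','u','l','e',' '])
    have hrestsub : ∀ x ∈ rest, x ∈ line := fun x hx =>
      hrsub x (by rw [← hrest]; simp [hx])
    have hlsrest : PySem.Chars.lstrip rest = rest.dropWhile pvIsSp := by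
      rw [PySem.Chars.lstrip]
      exact pv_dropWhile_congr _ _ rest (fun x hx => hws' x (hrestsub x hx))
    rw [if_pos hp, hdrop]
    cases ht : rest.dropWhile pvIsSp with
    | nil =>
      -- everything after "module " is blank: no capture, and A's stripped line is "module"
      have hall : ∀ x ∈ rest, pvWs x = true := by
        intro x hx
        rw [hws x (hrestsub x hx)]
        exact List.dropWhile_eq_nil_iff.mp ht x hx
      have hrr : PySem.Chars.rstrip r = "module".toList := by
        rw [← hrest, pv_rstrip_append_all _ _ hall]
        decide
      have hstart : PySem.Str.startswith (String.ofList (PySem.Chars.rstrip r)) "module " = false := by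
        rw [PySem.Str.startswith, String.toList_ofList, hrr]
        decide
      have hbadf : pvBadB line = false := by
        rw [pvBadB, hls, hdrop, hlsrest, ht]
        simp
      rw [hbadf]
      rw [if_neg (by rw [hstart]; exact Bool.false_ne_true)]
      simp
    | cons c cr =>
      have htsub : ∀ x ∈ c :: cr, x ∈ line := by
        intro x hx
        exact hrestsub x ((List.dropWhile_sublist _).subset (ht ▸ hx))
      have hcsp : pvIsSp c = false := pv_dropWhile_head_false pvIsSp c cr rest ht
      have hcbrk : pvIsBrk c = false := hb c (htsub c (by simp))
      have hcw : pvWs c = false := by rw [hws c (htsub c (by simp))]; exact hcsp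
      have hcrest : c ∈ rest := (List.dropWhile_sublist _).subset (ht ▸ List.mem_cons_self ..)
      have hex : ∃ x ∈ rest, pvWs x = false := ⟨c, hcrest, hcw⟩
      -- A's stripped line is "module " ++ rstrip rest
      have hrr : PySem.Chars.rstrip r = "module ".toList ++ PySem.Chars.rstrip rest := by
        rw [← hrest]; exact pv_rstrip_append _ _ hex
      have hstart : PySem.Str.startswith (String.ofList (PySem.Chars.rstrip r)) "module " = true := by
        rw [PySem.Str.startswith, String.toList_ofList, hrr, PySem.Chars.startswith]
        exact List.isPrefixOf_iff_prefix.mpr (List.prefix_append _ _)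
      -- decompose rest into its blank prefix and the tail
      have hpre : rest.takeWhile pvIsSp ++ (c :: cr) = rest := by
        rw [← ht]; exact List.takeWhile_append_dropWhile
      have hpreWs : ∀ x ∈ rest.takeWhile pvIsSp, pvWs x = true := by
        intro x hx
        rw [hws x (hrestsub x ((List.takeWhile_sublist _).subset hx))]
        exact List.mem_takeWhile_imp hx
      have hpreSp : ∀ x ∈ rest.takeWhile pvIsSp, pvIsSp x = true :=
        fun x hx => List.mem_takeWhile_imp hx
      have hrrest : PySem.Chars.rstrip rest =
          rest.takeWhile pvIsSp ++ (c :: PySem.Chars.rstrip cr) := by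
        conv_lhs => rw [← hpre]
        rw [pv_rstrip_append _ _ ⟨c, by simp, hcw⟩, pv_rstrip_cons c cr hcw]
      -- the bad test on this line reduces to "c is ':'"
      have h7 : r.take 7 = "module ".toList := by
        rw [← hrest, show (7 : Nat) = ("module ".toList : List Char).length from by decide,
          List.take_left]
      have hbadc : pvBadB line = (c == ':') := by
        rw [pvBadB, hls, hdrop, hlsrest, ht, h7]
        simp
      -- the second whitespace-token of A's stripped line
      have hw1 : pvWords (PySem.Chars.rstrip r) =
          "module".toList :: (c :: cr.takeWhile (fun x => !pvWs x)) ::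
            pvWords ((PySem.Chars.rstrip cr).dropWhile (fun x => !pvWs x)) := by
        rw [hrr, show "module ".toList ++ PySem.Chars.rstrip rest =
              "module".toList ++ (' ' :: PySem.Chars.rstrip rest) from rfl,
          pv_pvWords_word_sp _ _ (by
            rw [show ("module".toList : List Char) = ['m','o','d','u','l','e'] from rfl]
            intro c hc
            fin_cases hc <;> rfl) (by
            rw [show ("module".toList : List Char) = ['m','o','d','u','l','e'] from rfl]
            simp), hrrest,
          pvWords_ws_append _ _ hpreWs, pvWords_word c _ hcw, pv_takeWhile_rstrip]
      have hs0 : PySem.Str.split₀ (String.ofList (PySem.Chars.rstrip r)) =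
          String.ofList "module".toList ::
            String.ofList (c :: cr.takeWhile (fun x => !pvWs x)) ::
            List.map String.ofList (pvWords ((PySem.Chars.rstrip cr).dropWhile (fun x => !pvWs x))) := by
        rw [PySem.Str.split₀, String.toList_ofList, pv_split₀_eq, hw1, List.map_cons, List.map_cons]
      have hget1 : PySem.List.pyGet? (PySem.Str.split₀ (String.ofList (PySem.Chars.rstrip r))) 1 =
          some (String.ofList (c :: cr.takeWhile (fun x => !pvWs x))) := by
        rw [hs0]; simp [PySem.List.pyGet?, PySem.List.pyIdx?]
      obtain ⟨tail, htail⟩ := pv_splitOn_colon (c :: cr.takeWhile (fun x => !pvWs x))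
      have hsp : PySem.Str.split? (String.ofList (c :: cr.takeWhile (fun x => !pvWs x))) ":" =
          some (String.ofList ((c :: cr.takeWhile (fun x => !pvWs x)).takeWhile (fun x => !(x == ':'))) ::
            List.map String.ofList tail) := by
        rw [PySem.Str.split?, String.toList_ofList,
          show (":" : String).toList = [':'] from rfl, PySem.Chars.split?]
        rw [if_neg (by decide), htail]
        simp
      have hget0 : PySem.List.pyGet?
          (String.ofList ((c :: cr.takeWhile (fun x => !pvWs x)).takeWhile (fun x => !(x == ':'))) ::
            List.map String.ofList tail) 0 =
          some (String.ofList ((c :: cr.takeWhile (fun x => !pvWs x)).takeWhile (fun x => !(x == ':')))) := by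
        simp [PySem.List.pyGet?, PySem.List.pyIdx?]
      rw [if_pos hstart, hget1]
      dsimp only
      rw [hsp]
      dsimp only
      rw [hget0]
      dsimp only
      by_cases hcc : c = ':'
      · -- bad line: A extracts the empty name, B does not match
        subst hcc
        have hAname : (':' :: cr.takeWhile (fun x => !pvWs x)).takeWhile (fun x => !(x == ':')) =
            ([] : List Char) := by
          rw [List.takeWhile_cons]
          simp
        rw [if_pos (by rw [hbadc]; decide), hAname]
        rfl
      · -- good line: the two captured names coincide and are non-empty
        have hcapc : pvCap c = true := by
          rw [pvCap, hcsp, hcbrk]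
          simp [hcc]
        have hnames : (c :: cr).takeWhile pvCap =
            (c :: cr.takeWhile (fun x => !pvWs x)).takeWhile (fun x => !(x == ':')) := by
          have h1 : (c :: cr.takeWhile (fun x => !pvWs x)) = (c :: cr).takeWhile (fun x => !pvWs x) := by
            rw [List.takeWhile_cons, if_pos (by simp [hcw])]
          rw [h1, ← pv_takeWhile_and]
          exact pv_takeWhile_congr _ _ _ (fun x hx => by
            have hxline := htsub x hx
            have hbf : pvIsBrk x = false := hb x hxline
            have hwx : pvWs x = pvIsSp x := hws x hxline
            rw [pvCap, hbf, hwx]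
            cases hxw : pvIsSp x <;> cases hxc : (x == ':') <;> simp [hxw, hxc])
        have hBne : ((c :: cr).takeWhile pvCap).isEmpty = false := by
          rw [List.takeWhile_cons, if_pos hcapc]
          rfl
        rw [if_neg (by rw [hbadc]; simp [hcc]), hBne]
        simp only [Bool.false_eq_true, if_false, List.nil_append]
        rw [hnames]
  · -- no match: A cannot match either, since rstrip r is a prefix of r
    have hp2 : PySem.Chars.startswith (PySem.Chars.rstrip r) "module ".toList = false := by
      rw [PySem.Chars.startswith]
      by_cases h : "module ".toList.isPrefixOf (PySem.Chars.rstrip r) = true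
      · exact absurd (List.isPrefixOf_iff_prefix.mpr
          ((List.isPrefixOf_iff_prefix.mp h).trans (pv_rstrip_prefix r))) hp
      · exact eq_false_of_ne_true h
    have hp3 : PySem.Str.startswith (String.ofList (PySem.Chars.rstrip r)) "module " = false := by
      rw [PySem.Str.startswith, String.toList_ofList]; exact hp2
    have hbadf : pvBadB line = false := by
      rw [pvBadB, hls]
      rw [show (r.take 7 == "module ".toList) = false from by
        rw [beq_eq_false_iff_ne]
        intro hcon
        exact hp (List.isPrefixOf_iff_prefix.mpr (List.prefix_iff_eq_take.mpr (by
          rw [show ("module ".toList : List Char).length = 7 from by decide, ← hcon]))),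
        Bool.false_and]
    rw [hbadf, if_neg hp]
    rw [if_neg (show ¬ PySem.Str.startswith (String.ofList (PySem.Chars.rstrip r)) "module " = true by
      rw [hp3]; exact Bool.false_ne_true)]
    simp

-- ==== the main induction: B's anchor scan is the per-line matcher over splitlines ====
theorem pvMatchAt_nil : pvMatchAt [] = none := by decide

theorem pv_main (n : Nat) : ∀ cs : List Char, cs.length ≤ n → (∀ c ∈ cs, pvDomChar c = true) →
    pvScan cs = (pvLinesAux pvIsB0 cs []).flatMap pvLineRes := by
  induction n with
  | zero =>
    intro cs hl _
    have h0 : cs = [] := List.eq_nil_of_length_eq_zero (by omega)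
    subst h0; simp [pvScan, pvLinesAux]
  | succ n ih =>
    intro cs hl hd
    cases cs with
    | nil => simp [pvScan, pvLinesAux]
    | cons a cs' =>
      have hsplit : ((a :: cs').takeWhile fun x => !pvIsBrk x) ++
          ((a :: cs').dropWhile fun x => !pvIsBrk x) = a :: cs' := List.takeWhile_append_dropWhile
      set line := (a :: cs').takeWhile (fun x => !pvIsBrk x) with hline
      set d := (a :: cs').dropWhile (fun x => !pvIsBrk x) with hdd
      have hlineSub : ∀ c ∈ line, c ∈ a :: cs' := fun c hc => (List.takeWhile_sublist _).subset hc
      have hdSub : ∀ c ∈ d, c ∈ a :: cs' := fun c hc => (List.dropWhile_sublist _).subset hc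
      have hlineBrk : ∀ c ∈ line, pvIsBrk c = false := by
        intro c hc
        have h1 := List.mem_takeWhile_imp hc
        simpa using h1
      have hlineB : ∀ c ∈ line, pvIsB0 c = false := by
        intro c hc
        rw [pvIsB0_eq c (hd c (hlineSub c hc))]
        exact hlineBrk c hc
      have hR : pvIsB0 '\x0d' = true := by decide
      have hLA : pvLinesAux pvIsB0 (a :: cs') [] = pvLinesAux pvIsB0 d line.reverse := by
        rw [← hsplit, pv_linesAux_append pvIsB0 hR line d [] hlineB]; simp
      have hdlen : d.length ≤ (a :: cs').length := (List.dropWhile_sublist _).length_le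
      rw [pvScan, hLA]
      rw [← hline, ← hdd]
      cases hdc : d with
      | nil =>
        have hlineAll : line = a :: cs' := by rw [← hsplit, hdc]; simp
        simp only [List.drop_nil, pvScan]
        rw [pvLinesAux.eq_def]
        have : (line.reverse).isEmpty = false := by
          rw [hlineAll]; simp
        simp [this, pvLineRes]
      | cons b r =>
        have hbbrk : pvIsBrk b = true := by
          have := pv_dropWhile_head_false (fun x => !pvIsBrk x) b r (a :: cs') (by rw [← hdd, hdc])
          simpa using this
        have hbDom : pvDomChar b = true := hd b (hdSub b (by rw [hdc]; simp))
        have hbB0 : pvIsB0 b = true := by rw [pvIsB0_eq b hbDom, hbbrk]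
        by_cases hcrlf : b = '\x0d' ∧ ∃ r2, r = '\n' :: r2
        · obtain ⟨rfl, r2, rfl⟩ := hcrlf
          rw [show pvLinesAux pvIsB0 ('\x0d' :: '\n' :: r2) line.reverse =
            line.reverse.reverse :: pvLinesAux pvIsB0 r2 [] from rfl]
          simp only [List.flatMap_cons, List.reverse_reverse]
          have hr2 : pvScan ('\n' :: r2) = pvScan r2 := by
            rw [pvScan]
            have h1 : (('\n' :: r2).takeWhile fun x => !pvIsBrk x) = [] := by
              simp [List.takeWhile_cons]
              decide
            have h2 : (('\n' :: r2).dropWhile fun x => !pvIsBrk x) = '\n' :: r2 := by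
              rw [List.dropWhile_cons, if_neg (by simp; decide)]
            rw [h1, h2, pvMatchAt_nil]
            simp
          have hlen : r2.length ≤ n := by
            have : d.length ≤ n + 1 := le_trans hdlen hl
            rw [hdc] at this; simp at this; omega
          have hdom2 : ∀ c ∈ r2, pvDomChar c = true := by
            intro c hc; exact hd c (hdSub c (by rw [hdc]; simp [hc]))
          rw [List.drop_succ_cons, List.drop_zero, hr2, ih r2 hlen hdom2]
          rfl
        · rw [pvLinesAux_brk pvIsB0 b r line.reverse hbB0 hcrlf]
          simp only [List.flatMap_cons, List.reverse_reverse]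
          have hlen : r.length ≤ n := by
            have : d.length ≤ n + 1 := le_trans hdlen hl
            rw [hdc] at this; simp at this; omega
          have hdomr : ∀ c ∈ r, pvDomChar c = true := by
            intro c hc; exact hd c (hdSub c (by rw [hdc]; simp [hc]))
          rw [List.drop_succ_cons, List.drop_zero, ih r hlen hdomr]
          rfl

-- A as a flatMap over the char-level lines, B likewise.
theorem pv_A_flatMap (code : String) :
    get_snakemake_module_names_from_code_py code =
      (pvLinesAux pvIsB0 code.toList []).flatMap (fun l => pvBodyA [] (String.ofList l)) := by
  unfold get_snakemake_module_names_from_code_py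
  rw [show PySem.Str.splitlines code =
      (PySem.Chars.splitlines code.toList).map String.ofList from rfl,
    pv_splitlines_eq, pv_go_eq, pv_foldl_bodyA]
  simp [List.flatMap_map]

theorem pv_splitlines_lines (code : String) :
    PySem.Str.splitlines code = (pvLinesAux pvIsB0 code.toList []).map String.ofList := by
  rw [show PySem.Str.splitlines code =
      (PySem.Chars.splitlines code.toList).map String.ofList from rfl,
    pv_splitlines_eq, pv_go_eq]
  simp

-- every line of the decomposition has domain, break-free characters
theorem pv_line_facts (code : String) (hdom : Dom_get_snakemake_module_names_from_code_py code)
    (l : List Char) (hl : l ∈ pvLinesAux pvIsB0 code.toList []) :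
    (∀ c ∈ l, pvDomChar c = true) ∧ (∀ c ∈ l, pvIsBrk c = false) := by
  have hd : ∀ c ∈ code.toList, pvDomChar c = true := by
    have := hdom; unfold Dom_get_snakemake_module_names_from_code_py pvDomStr at this
    simpa [List.all_eq_true] using this
  have h := pvLinesAux_chars pvIsB0 (by decide) code.toList [] l hl
  constructor
  · intro c hc
    rcases h c hc with h0 | ⟨h1, _⟩
    · cases h0
    · exact hd c h1
  · intro c hc
    rcases h c hc with h0 | ⟨h1, h2⟩
    · cases h0
    · rw [← pvIsB0_eq c (hd c h1)]; exact h2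

-- B never produces an empty name.
theorem pv_matchAt_ne_nil (l name : List Char) (h : pvMatchAt l = some name) : name ≠ [] := by
  rw [pvMatchAt] at h
  dsimp only at h
  split at h
  · split at h
    · cases h
    · rename_i hne
      obtain rfl := Option.some.injEq .. |>.mp h
      intro hcon
      rw [hcon] at hne
      exact hne rfl
  · cases h

theorem pv_scan_no_empty (n : Nat) : ∀ cs : List Char, cs.length ≤ n →
    "" ∉ pvScan cs := by
  induction n with
  | zero =>
    intro cs hl
    have h0 : cs = [] := List.eq_nil_of_length_eq_zero (by omega)
    subst h0; simp [pvScan]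
  | succ n ih =>
    intro cs hl
    cases cs with
    | nil => simp [pvScan]
    | cons a cs' =>
      rw [pvScan]
      intro hmem
      rcases List.mem_append.mp hmem with h | h
      · revert h
        cases hm : pvMatchAt ((a :: cs').takeWhile fun x => !pvIsBrk x) with
        | none => simp
        | some name =>
          have hne := pv_matchAt_ne_nil _ _ hm
          simp only [List.mem_singleton]
          intro hcon
          exact hne (by simpa using congrArg String.toList hcon.symm)
      · have hlen : (((a :: cs').dropWhile fun x => !pvIsBrk x).drop 1).length ≤ n := by
          have h2 := pvScan_dec a cs'
          simp only [List.length_cons] at h2 hl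
          omega
        exact ih _ hlen h

-- ===== VERDICT (by name: the statements are the Claim_ definitions above) =====
theorem get_snakemake_module_names_from_code_py_spec : Claim_unchanged_get_snakemake_module_names_from_code_py := by
  intro code hdom
  unfold Spec_get_snakemake_module_names_from_code_py
  intro hND
  unfold get_snakemake_module_names_from_code_py_alt
  rw [pv_A_flatMap, pv_main code.toList.length code.toList le_rfl (by
    have := hdom; unfold Dom_get_snakemake_module_names_from_code_py pvDomStr at this
    simpa [List.all_eq_true] using this)]
  apply pv_flatMap_congr
  intro l hl
  obtain ⟨hld, hlb⟩ := pv_line_facts code hdom l hl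
  rw [pv_line_main l hld hlb]
  rw [if_neg ?_]
  intro hbadl
  apply hND
  rw [pv_D_iff]
  refine ⟨String.ofList l, by rw [pv_splitlines_lines]; exact List.mem_map_of_mem hl, ?_⟩
  rw [String.toList_ofList]
  exact hbadl

theorem get_snakemake_module_names_from_code_py_changed : Claim_changed_get_snakemake_module_names_from_code_py := by
  unfold Claim_changed_get_snakemake_module_names_from_code_py
  refine ⟨by decide, by decide, by decide, ?_, by decide⟩
  unfold get_snakemake_module_names_from_code_py_alt pvDiffWitness_get_snakemake_module_names_from_code_py
  simp [pvScan, pvMatchAt, pvIsBrk, pvIsSp, pvCap, List.takeWhile, List.dropWhile,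
    pvDiffWitnessOut_get_snakemake_module_names_from_code_py]

theorem get_snakemake_module_names_from_code_py_tight : Claim_exact_get_snakemake_module_names_from_code_py := by
  intro code hdom hD hEq
  rw [pv_D_iff, pv_splitlines_lines] at hD
  obtain ⟨s, hs, hbad⟩ := hD
  obtain ⟨l, hl, rfl⟩ := List.mem_map.mp hs
  have hbad2 : pvBadB l = true := by
    have h0 : pvBadB (String.ofList l).toList = true := hbad
    rw [String.toList_ofList] at h0
    exact h0
  obtain ⟨hld, hlb⟩ := pv_line_facts code hdom l hl
  have hmem : "" ∈ get_snakemake_module_names_from_code_py code := by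
    rw [pv_A_flatMap, List.mem_flatMap]
    exact ⟨l, hl, by rw [pv_line_main l hld hlb, if_pos hbad2]; simp⟩
  rw [hEq] at hmem
  exact pv_scan_no_empty code.toList.length code.toList le_rfl hmem
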